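-- pv_equiv track=rewrite | github.com/c10t/k-pro | atcoder/ten1-2019-b/c.py | count
-- ===== SOURCE A (Python) =====
-- def count(s):
--     w = s.count('.')
--     candidate = w
--     for i in range(len(s)):
--         if s[i] == '#':
--             w += 1
--         else:
--             w -= 1
--         candidate = min(candidate, w)
--
--     return candidate
-- ===== SOURCE B (Python) =====
-- def count(s):
--     # Divide and conquer: for a segment, scan returns (balance, min prefix balance),
--     # where '#' scores +1 and any other character -1; halves combine in O(1).
--     # Answer = number of '.' plus the minimum prefix balance of the whole string.
--     def scan(i, j):
--         if i == j:
--             return (0, 0)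
--         if j == i + 1:
--             b = 1 if s[i] == '#' else -1
--             return (b, min(0, b))
--         m = (i + j) // 2
--         t1, m1 = scan(i, m)
--         t2, m2 = scan(m, j)
--         return (t1 + t2, min(m1, t1 + m2))
--     return s.count('.') + scan(0, len(s))[1]
-- ===== Notes on version B (the rewrite author's own statement) =====
-- stated objective: alternative
-- what changed: Replaces A's single running scan (balance plus running minimum) by a divide-and-conquer that combines (balance, min-prefix-balance) pairs of the two halves and adds the dot count at the end.
import Mathlib
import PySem

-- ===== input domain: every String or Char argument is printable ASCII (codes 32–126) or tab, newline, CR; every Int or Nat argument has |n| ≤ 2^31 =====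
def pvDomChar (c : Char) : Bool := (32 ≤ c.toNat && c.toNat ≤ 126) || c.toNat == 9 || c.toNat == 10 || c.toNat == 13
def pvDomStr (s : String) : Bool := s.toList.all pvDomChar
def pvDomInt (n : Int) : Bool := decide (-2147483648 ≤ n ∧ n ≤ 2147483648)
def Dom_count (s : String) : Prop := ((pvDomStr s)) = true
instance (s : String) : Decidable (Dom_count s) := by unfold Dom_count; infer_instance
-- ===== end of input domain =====

-- B replaces A's running-balance scan with a running minimum by a divide-and-conquer
-- combining (balance, min-prefix-balance) pairs of halves; objective: alternative
-- decomposition, same linear total cost.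


-- ===== PORT A =====
-- loop body: w += 1 if s[i]=='#' else w -= 1; candidate = min(candidate, w)
def stepA (p : Int × Int) (c : Char) : Int × Int :=
  let w' := if c = '#' then p.1 + 1 else p.1 - 1
  (w', min p.2 w')

def count (s : String) : Int :=
  let w : Int := (PySem.Str.count s "." : Int)
  (s.toList.foldl stepA (w, w)).2

-- ===== PORT B =====
-- scan(i, j) of Source B works on the segment s[i:j] with midpoint (i+j)//2; here the
-- segment is the sublist itself and the midpoint split is take/drop at length/2.
def scanB : List Char → Int × Int
  | [] => (0, 0)
  | [c] =>
      let b : Int := if c = '#' then 1 else -1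
      (b, min 0 b)
  | x :: y :: t =>
      let m := (x :: y :: t).length / 2
      let p1 := scanB ((x :: y :: t).take m)
      let p2 := scanB ((x :: y :: t).drop m)
      (p1.1 + p2.1, min p1.2 (p1.1 + p2.2))
  termination_by l => l.length
  decreasing_by
  · simp; omega
  · simp; omega

def count_alt (s : String) : Int :=
  (PySem.Str.count s "." : Int) + (scanB s.toList).2

-- ===== PRECONDITION & SPEC =====
def Spec_count (s : String) (out : Int) : Prop := out = count_alt s
instance (s : String) (out : Int) : Decidable (Spec_count s out) := by unfold Spec_count; infer_instance

-- ===== CLAIM (what is proved, stated in full; the proofs are below) =====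
def Claim_equal_count : Prop := ∀ (s : String), Dom_count s → Spec_count s (count s)

-- ===== LEMMAS AND PROOFS =====

-- per-character balance: '#' scores +1, anything else -1
def balC (c : Char) : Int := if c = '#' then 1 else -1

-- total balance of a list
def bal (l : List Char) : Int := (l.map balC).sum

-- minimum balance over all prefixes (including the empty one)
def mpref : List Char → Int
  | [] => 0
  | c :: t => min 0 (balC c + mpref t)

lemma mpref_nonpos (l : List Char) : mpref l ≤ 0 := by
  cases l with
  | nil => simp [mpref]
  | cons c t => simp [mpref]

lemma bal_append (a b : List Char) : bal (a ++ b) = bal a + bal b := by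
  simp [bal]

lemma mpref_append (a b : List Char) :
    mpref (a ++ b) = min (mpref a) (bal a + mpref b) := by
  induction a with
  | nil =>
      have := mpref_nonpos b
      simp [mpref, bal, min_def]
      omega
  | cons c t ih =>
      simp only [List.cons_append, mpref, ih, bal, List.map_cons, List.sum_cons]
      simp only [min_def]
      split_ifs <;> omega

lemma scanB_eq (l : List Char) : scanB l = (bal l, mpref l) := by
  induction l using scanB.induct with
  | case1 => simp [scanB, bal, mpref]
  | case2 c =>
      simp [scanB, bal, mpref, balC]
  | case3 x y t m ih1 ih2 =>
      rw [scanB, ih1, ih2]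
      have hsplit : (x :: y :: t).take ((x :: y :: t).length / 2) ++
          (x :: y :: t).drop ((x :: y :: t).length / 2) = x :: y :: t :=
        List.take_append_drop _ _
      conv_rhs => rw [← hsplit]
      rw [bal_append, mpref_append]

-- A's loop through bal/mpref: with cand ≤ w the fold's candidate is
-- min cand (w + mpref l)
lemma foldA_eq (l : List Char) :
    ∀ (w cand : Int), cand ≤ w →
      (l.foldl stepA (w, cand)).2 = min cand (w + mpref l) := by
  induction l with
  | nil =>
      intro w cand h
      simp [mpref, min_def]
      omega
  | cons c t ih =>
      intro w cand h
      have hm := mpref_nonpos t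
      simp only [List.foldl_cons]
      have hstep : stepA (w, cand) c =
          (if c = '#' then w + 1 else w - 1, min cand (if c = '#' then w + 1 else w - 1)) := rfl
      rw [hstep, ih _ _ (min_le_right _ _)]
      simp only [mpref, balC]
      by_cases hc : c = '#' <;> simp only [hc, if_true, if_false, min_def] <;>
        split_ifs <;> omega

-- ===== VERDICT (by name: the statement is the Claim_ definition above) =====
theorem count_spec : Claim_equal_count := by
  intro s _
  unfold Spec_count count count_alt
  rw [scanB_eq]
  rw [foldA_eq s.toList _ _ (le_refl _)]
  have := mpref_nonpos s.toList
  simp only [min_def]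
  split_ifs <;> omega
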